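-- pv_equiv track=rewrite | github.com/yuejiangw/LeetCode | Category/SlidingWindow/Medium/2107.py | shareCandies
-- ===== SOURCE A (Python) =====
-- from collections import Counter
-- from typing import List
--
-- def shareCandies(candies: List[int], k: int) -> int:
--     '''
--     find a fixed-length window, whose candy type is the least
--     '''
--     candy_type = Counter(candies)
--     if k == 0:
--         return len(candy_type)
--     l = r = 0
--     res = 0
--     while r < len(candies):
--         # expand
--         c = candies[r]
--         r += 1
--         candy_type[c] -= 1
--         if candy_type[c] == 0:
--             del candy_type[c]
--         if r - l < k:
--             continue
--         # collect
--         res = max(res, len(candy_type))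
--         # shrink
--         d = candies[l]
--         l += 1
--         candy_type[d] += 1
--     return res
-- ===== SOURCE B (Python) =====
-- def shareCandies(candies, k):
--     total = len(set(candies))
--     if k == 0:
--         return total
--     n = len(candies)
--     return max((len(set(candies[:l] + candies[l + k:])) for l in range(n - k + 1)),
--                default=0)
-- ===== Notes on version B (the rewrite author's own statement) =====
-- stated objective: simpler
-- what changed: Replaces A's incremental sliding-window Counter (decrement/delete on expand, re-increment on shrink, running max) with a direct per-window computation: the answer is the max over window starts l of len(set(candies[:l] + candies[l+k:])), with the k == 0 and no-window cases falling out of the range/default.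
-- outside the precondition, e.g. on shareCandies([1, 2, 3], -1): A returns 2, B returns 3
import Mathlib
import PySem

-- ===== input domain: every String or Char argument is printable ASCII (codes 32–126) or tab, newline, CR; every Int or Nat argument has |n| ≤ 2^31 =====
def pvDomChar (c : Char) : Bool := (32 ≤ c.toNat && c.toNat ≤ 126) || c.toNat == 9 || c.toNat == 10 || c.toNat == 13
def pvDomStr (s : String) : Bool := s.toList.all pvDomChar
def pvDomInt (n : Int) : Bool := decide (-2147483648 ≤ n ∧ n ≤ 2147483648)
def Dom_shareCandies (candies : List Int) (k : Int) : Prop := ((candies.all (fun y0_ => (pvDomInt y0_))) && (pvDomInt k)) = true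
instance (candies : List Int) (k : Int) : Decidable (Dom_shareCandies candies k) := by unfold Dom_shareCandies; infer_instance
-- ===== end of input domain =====

-- B recomputes each window's answer from scratch as len(set(prefix+suffix)) instead of
-- maintaining A's incremental sliding-window Counter; objective: simpler, not faster.

-- ===== PORT A =====
-- the while loop of A: state (candy_type, l, r, res); Counter lookups are getD _ 0 (missing key = 0)
def shareCandiesLoop (candies : List Int) (k : Int)
    (ct : PySem.Dict Int Int) (l r res : Int) : Int :=
  if h : r < (candies.length : Int) then
    -- c = candies[r]; r is always in range here, so pyGetD is exact
    let c := PySem.List.pyGetD candies r 0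
    let r' := r + 1
    let ct1 := ct.insert c (ct.getD c 0 - 1)
    let ct2 := if ct1.getD c 0 = 0 then ct1.erase c else ct1
    if r' - l < k then
      shareCandiesLoop candies k ct2 l r' res
    else
      let res' := max res ((ct2.size : Int))
      -- d = candies[l]; l is always in range here
      let d := PySem.List.pyGetD candies l 0
      shareCandiesLoop candies k (ct2.insert d (ct2.getD d 0 + 1)) (l + 1) r' res'
  else res
termination_by ((candies.length : Int) - r).toNat
decreasing_by all_goals omega

def shareCandies (candies : List Int) (k : Int) : Int :=
  let candy_type := PySem.Dict.counter candies
  if k = 0 then (candy_type.size : Int)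
  else shareCandiesLoop candies k candy_type 0 0 0

-- ===== PORT B =====
def shareCandies_alt (candies : List Int) (k : Int) : Int :=
  let total : Int := ((PySem.Set.ofList candies).length : Int)
  if k = 0 then total
  else
    let n : Int := (candies.length : Int)
    let vals := (PySem.List.pyRange 0 (n - k + 1)).map (fun l =>
      ((PySem.Set.ofList (PySem.List.slice candies none (some l)
          ++ PySem.List.slice candies (some (l + k)) none)).length : Int))
    match PySem.List.max? vals (fun x => x) with
    | some m => m
    | none => 0

-- ===== PRECONDITION & SPEC =====
-- Pre_ excludes negative k, which is outside the task's natural domain (a window length):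
-- there A happens to behave as if k were 1 (an artefact of its shrink condition), while B
-- naturally returns the total number of distinct types.
def Pre_shareCandies (candies : List Int) (k : Int) : Prop := 0 ≤ k
instance (candies : List Int) (k : Int) : Decidable (Pre_shareCandies candies k) := by
  unfold Pre_shareCandies; infer_instance

def pvWitness_shareCandies : List Int × Int := ([1, 2, 1, 3], 2)

def Spec_shareCandies (candies : List Int) (k : Int) (out : Int) : Prop := out = shareCandies_alt candies k
instance (candies : List Int) (k : Int) (out : Int) : Decidable (Spec_shareCandies candies k out) := by unfold Spec_shareCandies; infer_instance

-- ===== CLAIM (what is proved, stated in full; the proofs are below) =====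
def Claim_equal_shareCandies : Prop := ∀ (candies : List Int) (k : Int), Dom_shareCandies candies k → Pre_shareCandies candies k → Spec_shareCandies candies k (shareCandies candies k)

-- ===== LEMMAS AND PROOFS =====

-- distinct count of the part of cs outside the window of length kn starting at i
def wval (cs : List Int) (kn : Nat) (i : Nat) : Int :=
  ((PySem.Set.ofList (cs.take i ++ cs.drop (i + kn))).length : Int)

theorem pv_find?_filter_ne (items : List (Int × Int)) (x c : Int) (h : x ≠ c) :
    (items.filter (fun p => !(p.1 == c))).find? (fun p => p.1 == x)
      = items.find? (fun p => p.1 == x) := by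
  induction items with
  | nil => rfl
  | cons p t ih =>
    by_cases hpc : p.1 = c
    · have hx : ¬ ((p.1 == x) = true) := by simp [hpc, Ne.symm h]
      rw [List.filter_cons, if_neg (by simp [hpc]), ih]
      exact (List.find?_cons_of_neg (p := fun (q : Int × Int) => q.1 == x) hx).symm
    · rw [List.filter_cons, if_pos (by simp [hpc])]
      by_cases hpx : p.1 = x
      · rw [List.find?_cons_of_pos (by simp [hpx]), List.find?_cons_of_pos (by simp [hpx])]
      · rw [List.find?_cons_of_neg (by simp [hpx]), List.find?_cons_of_neg (by simp [hpx]), ih]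

theorem pv_get?_erase_of_ne (d : PySem.Dict Int Int) (x c : Int) (h : x ≠ c) :
    (d.erase c).get? x = d.get? x := by
  simp [PySem.Dict.erase, PySem.Dict.get?, pv_find?_filter_ne d.items x c h]

theorem pv_get?_erase_self (d : PySem.Dict Int Int) (c : Int) :
    (d.erase c).get? c = none := by
  simp only [PySem.Dict.erase, PySem.Dict.get?]
  rw [List.find?_eq_none.mpr]
  · rfl
  · intro p hmem
    have := List.of_mem_filter hmem
    simpa using this

theorem pv_keys_erase (d : PySem.Dict Int Int) (c : Int) :
    (d.erase c).keys = d.keys.filter (fun x => !(x == c)) := by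
  simp [PySem.Dict.erase, PySem.Dict.keys]
  induction d.items with
  | nil => rfl
  | cons p t ih => by_cases hpc : p.1 = c <;> simp [hpc, ih]

theorem pv_keys_length_eq_size (d : PySem.Dict Int Int) : d.keys.length = d.size := by
  simp [PySem.Dict.keys, PySem.Dict.size]

-- a dict whose nodup key list has the same members as distinct(out) has size |set(out)|
theorem pv_size_eq_set_length (d : PySem.Dict Int Int) (out : List Int)
    (hnd : d.keys.Nodup) (hmem : ∀ c, c ∈ d.keys ↔ c ∈ out) :
    (d.size : Int) = ((PySem.Set.ofList out).length : Int) := by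
  have hperm : d.keys.Perm (PySem.Set.ofList out) := by
    rw [List.perm_ext_iff_of_nodup hnd (PySem.Set.nodup_ofList out)]
    intro a
    rw [PySem.Set.mem_ofList]
    exact hmem a
  rw [← pv_keys_length_eq_size]
  exact_mod_cast hperm.length_eq

theorem pv_foldl_max_append (xs : List Int) (a y : Int) :
    (xs ++ [y]).foldl max a = max (xs.foldl max a) y := by
  simp [List.foldl_append]

-- A's while loop computes the running max over all full windows, by induction on len - rn
theorem loopA_eq (cs : List Int) (kn : Nat) (hk : 1 ≤ kn)
    (rn ln : Nat) (hr : rn ≤ cs.length)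
    (hl : (ln : Int) = max 0 ((rn : Int) - (kn : Int) + 1))
    (ct : PySem.Dict Int Int)
    (hcount : ∀ c, ct.getD c 0 = ((cs.take ln ++ cs.drop rn).count c : Int))
    (hnd : ct.keys.Nodup)
    (hmem : ∀ c, c ∈ ct.keys ↔ c ∈ cs.take ln ++ cs.drop rn)
    (res : Int)
    (hres : res = ((List.range ln).map (wval cs kn)).foldl max 0) :
    shareCandiesLoop cs (kn : Int) ct (ln : Int) (rn : Int) res
      = ((List.range (cs.length + 1 - kn)).map (wval cs kn)).foldl max 0 := by
  rw [shareCandiesLoop]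
  by_cases hrn : (rn : Int) < (cs.length : Int)
  · rw [dif_pos hrn]
    simp only []
    have hrlt : rn < cs.length := by exact_mod_cast hrn
    have hln_le : ln ≤ rn := by omega
    have hc : PySem.List.pyGetD cs (rn : Int) 0 = cs[rn] := by
      rw [PySem.List.pyGetD_natCast]
      exact List.getD_eq_getElem cs 0 hrlt
    rw [hc]
    have hdrop : cs.drop rn = cs[rn] :: cs.drop (rn + 1) := List.drop_eq_getElem_cons hrlt
    -- counts of the outside list lose one occurrence of cs[rn] when r advances
    have hsplit : ∀ x : Int, (cs.take ln ++ cs.drop rn).count x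
        = (cs.take ln ++ cs.drop (rn + 1)).count x + (if x = cs[rn] then 1 else 0) := by
      intro x
      rw [hdrop]
      simp only [List.count_append, List.count_cons]
      by_cases hx : x = cs[rn] <;> simp [hx] <;> omega
    have hmemsplit : ∀ x : Int, x ∈ cs.take ln ++ cs.drop rn
        ↔ x = cs[rn] ∨ x ∈ cs.take ln ++ cs.drop (rn + 1) := by
      intro x
      rw [hdrop]
      simp only [List.mem_append, List.mem_cons]
      tauto
    -- state after `candy_type[c] -= 1`
    have hcount1 : ∀ x : Int,
        (ct.insert cs[rn] (ct.getD cs[rn] 0 - 1)).getD x 0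
          = ((cs.take ln ++ cs.drop (rn + 1)).count x : Int) := by
      intro x
      rw [PySem.Dict.getD_insert]
      by_cases hx : x = cs[rn]
      · rw [if_pos hx, hcount, hsplit cs[rn]]
        simp [hx]
      · rw [if_neg hx, hcount, hsplit x, if_neg hx]
        simp
    have hcmem : cs[rn] ∈ ct.keys := by
      rw [hmem]
      exact List.mem_append_right _ (by rw [hdrop]; exact List.mem_cons_self)
    have hkeys1 : (ct.insert cs[rn] (ct.getD cs[rn] 0 - 1)).keys = ct.keys :=
      PySem.Dict.keys_insert_of_contains _ _
        ((PySem.Dict.contains_iff_mem_keys _ _).mpr hcmem)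
    -- the dict after the conditional delete satisfies the invariants for rn+1
    have hstep : ∀ ct2 : PySem.Dict Int Int,
        ct2 = (if (ct.insert cs[rn] (ct.getD cs[rn] 0 - 1)).getD cs[rn] 0 = 0
          then (ct.insert cs[rn] (ct.getD cs[rn] 0 - 1)).erase cs[rn]
          else ct.insert cs[rn] (ct.getD cs[rn] 0 - 1)) →
        (∀ x : Int, ct2.getD x 0 = ((cs.take ln ++ cs.drop (rn + 1)).count x : Int))
          ∧ ct2.keys.Nodup
          ∧ (∀ x : Int, x ∈ ct2.keys ↔ x ∈ cs.take ln ++ cs.drop (rn + 1)) := by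
      intro ct2 hct2
      by_cases hz : (ct.insert cs[rn] (ct.getD cs[rn] 0 - 1)).getD cs[rn] 0 = 0
      · rw [if_pos hz] at hct2
        have hz' : (cs.take ln ++ cs.drop (rn + 1)).count cs[rn] = 0 := by
          have := hcount1 cs[rn]
          rw [hz] at this
          exact_mod_cast this.symm
        subst hct2
        refine ⟨?_, ?_, ?_⟩
        · intro x
          by_cases hx : x = cs[rn]
          · rw [PySem.Dict.getD_eq_get?_getD, hx, pv_get?_erase_self]
            simp [hz']
          · rw [PySem.Dict.getD_eq_get?_getD, pv_get?_erase_of_ne _ _ _ hx,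
              ← PySem.Dict.getD_eq_get?_getD, hcount1]
        · rw [pv_keys_erase, hkeys1]
          exact hnd.filter _
        · intro x
          rw [pv_keys_erase, hkeys1, List.mem_filter]
          by_cases hx : x = cs[rn]
          · subst hx
            simp only [BEq.rfl, Bool.not_true]
            constructor
            · intro h; exact absurd h.2 (by simp)
            · intro h
              exact absurd (List.count_pos_iff.mpr h) (by omega)
          · have : (!(x == cs[rn])) = true := by simp [hx]
            rw [this]
            simp only [and_true]
            rw [hmem, hmemsplit]
            tauto
      · rw [if_neg hz] at hct2
        subst hct2
        refine ⟨hcount1, by rw [hkeys1]; exact hnd, ?_⟩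
        intro x
        rw [hkeys1, hmem, hmemsplit]
        by_cases hx : x = cs[rn]
        · subst hx
          have hpos : 0 < (cs.take ln ++ cs.drop (rn + 1)).count cs[rn] := by
            have := hcount1 cs[rn]
            have hge : (0:Int) ≤ ((cs.take ln ++ cs.drop (rn + 1)).count cs[rn] : Int) := by positivity
            by_contra hcon
            apply hz
            rw [hcount1]
            omega
          have := List.count_pos_iff.mp hpos
          tauto
        · tauto
    set ct2 : PySem.Dict Int Int := (if (ct.insert cs[rn] (ct.getD cs[rn] 0 - 1)).getD cs[rn] 0 = 0
          then (ct.insert cs[rn] (ct.getD cs[rn] 0 - 1)).erase cs[rn]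
          else ct.insert cs[rn] (ct.getD cs[rn] 0 - 1)) with hct2
    obtain ⟨hcount2, hnd2, hmem2⟩ := hstep ct2 hct2
    by_cases hbr : (rn : Int) + 1 - (ln : Int) < (kn : Int)
    · rw [if_pos hbr]
      have h1 : (rn : Int) + 1 = ((rn + 1 : Nat) : Int) := by push_cast; ring
      rw [h1]
      exact loopA_eq cs kn hk (rn + 1) ln (by omega) (by push_cast at hl ⊢; omega)
        _ hcount2 hnd2 hmem2 res hres
    · rw [if_neg hbr]
      -- here the window [ln, rn] is full: rn + 1 = ln + kn
      have hfull : rn + 1 = ln + kn := by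
        have := hl
        omega
      have hlnlt : ln < cs.length := by omega
      have hsz : ((ct2.size : Nat) : Int) = wval cs kn ln := by
        unfold wval
        rw [pv_size_eq_set_length _ (cs.take ln ++ cs.drop (rn + 1)) hnd2 hmem2]
        rw [hfull]
      have hd : PySem.List.pyGetD cs (ln : Int) 0 = cs[ln] := by
        rw [PySem.List.pyGetD_natCast]
        exact List.getD_eq_getElem cs 0 hlnlt
      rw [hsz, hd]
      have htake : cs.take (ln + 1) = cs.take ln ++ [cs[ln]] := by
        rw [List.take_add_one, List.getElem?_eq_getElem hlnlt]
        rfl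
      -- counts after `candy_type[d] += 1`
      have hcount3 : ∀ x : Int,
          ((ct2.insert cs[ln] (ct2.getD cs[ln] 0 + 1)).getD x 0)
            = ((cs.take (ln + 1) ++ cs.drop (rn + 1)).count x : Int) := by
        intro x
        rw [PySem.Dict.getD_insert, htake]
        have hca : (cs.take ln ++ [cs[ln]] ++ cs.drop (rn + 1)).count x
            = (cs.take ln ++ cs.drop (rn + 1)).count x + (if x = cs[ln] then 1 else 0) := by
          simp only [List.count_append, List.count_singleton]
          by_cases hx : x = cs[ln] <;> simp [hx] <;> omega
        rw [hca]
        by_cases hx : x = cs[ln]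
        · rw [if_pos hx, hcount2, hx]
          simp
        · rw [if_neg hx, hcount2, if_neg hx]
          simp
      have hmem3 : ∀ x : Int,
          x ∈ (ct2.insert cs[ln] (ct2.getD cs[ln] 0 + 1)).keys
            ↔ x ∈ cs.take (ln + 1) ++ cs.drop (rn + 1) := by
        intro x
        rw [PySem.Dict.mem_keys_insert, hmem2, htake]
        simp only [List.mem_append, List.mem_singleton]
        tauto
      have hnd3 := PySem.Dict.nodup_keys_insert ct2 cs[ln] (ct2.getD cs[ln] 0 + 1) hnd2
      have h1 : (rn : Int) + 1 = ((rn + 1 : Nat) : Int) := by push_cast; ring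
      have h2 : (ln : Int) + 1 = ((ln + 1 : Nat) : Int) := by push_cast; ring
      rw [h1, h2]
      rw [loopA_eq cs kn hk (rn + 1) (ln + 1) (by omega) (by push_cast at hl ⊢; omega)
        _ hcount3 hnd3 hmem3 (max res (wval cs kn ln)) ?_]
      rw [List.range_succ, List.map_append, List.map_singleton, pv_foldl_max_append, hres]
  · rw [dif_neg hrn]
    have hrn' : rn = cs.length := by omega
    subst hrn'
    have hln : ln = cs.length + 1 - kn := by omega
    rw [hres, hln]
termination_by cs.length - rn
decreasing_by all_goals omega

-- B, for kn ≥ 1, is the max over the same window values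
theorem pv_pyRange_zero (m : Int) :
    PySem.List.pyRange 0 m = List.map (fun i : Nat => (i : Int)) (List.range m.toNat) := by
  unfold PySem.List.pyRange
  rw [if_neg (by norm_num)]
  simp only [show ((0:Int) < 1) = True by simp, if_true]
  by_cases hm : 0 < m
  · rw [if_pos hm]
    norm_num
  · rw [if_neg hm]
    have : m.toNat = 0 := by omega
    simp [this]

theorem pv_max_match (vals : List Int) (h : ∀ x ∈ vals, 0 ≤ x) :
    (match PySem.List.max? vals (fun x => x) with | some m => m | none => (0 : Int))
      = vals.foldl max 0 := by
  cases vals with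
  | nil => rfl
  | cons x t =>
    rw [PySem.List.max?_id_cons]
    have hx : max 0 x = x := max_eq_right (h x (by simp))
    simp [List.foldl_cons, hx]

theorem altB_eq (cs : List Int) (kn : Nat) (hk : 1 ≤ kn) :
    shareCandies_alt cs (kn : Int)
      = ((List.range (cs.length + 1 - kn)).map (wval cs kn)).foldl max 0 := by
  unfold shareCandies_alt
  simp only []
  rw [if_neg (by exact_mod_cast Nat.one_le_iff_ne_zero.mp hk)]
  rw [pv_pyRange_zero, List.map_map]
  have hM : ((cs.length : Int) - (kn : Int) + 1).toNat = cs.length + 1 - kn := by omega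
  rw [hM]
  simp only [Function.comp_def]
  have hmap : ∀ i : Nat,
      ((PySem.Set.ofList (PySem.List.slice cs none (some (i : Int))
          ++ PySem.List.slice cs (some ((i : Int) + (kn : Int))) none)).length : Int)
        = wval cs kn i := by
    intro i
    rw [PySem.List.slice_to cs (by positivity), PySem.List.slice_from cs (by positivity)]
    have h2 : (i : Int) + (kn : Int) = ((i + kn : Nat) : Int) := by push_cast; ring
    rw [h2, Int.toNat_natCast, Int.toNat_natCast]
    rfl
  rw [List.map_congr_left (fun i _ => hmap i)]
  rw [pv_max_match]
  intro x hx
  obtain ⟨i, _, rfl⟩ := List.mem_map.mp hx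
  unfold wval
  positivity

-- ===== VERDICT (by name: the statement is the Claim_ definition above) =====
theorem shareCandies_spec : Claim_equal_shareCandies := by
  intro candies k _ hpre
  unfold Spec_shareCandies shareCandies
  by_cases hk0 : k = 0
  · subst hk0
    unfold shareCandies_alt
    simp only [reduceIte]
    rw [← pv_keys_length_eq_size, PySem.Dict.keys_counter]
  · have hk1 : 1 ≤ k := by
      have : 0 ≤ k := hpre
      omega
    obtain ⟨kn, rfl⟩ : ∃ kn : Nat, k = (kn : Int) := ⟨k.toNat, by omega⟩
    have hkn : 1 ≤ kn := by exact_mod_cast hk1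
    simp only [if_neg hk0]
    rw [altB_eq candies kn hkn]
    have h0 : ((0 : Nat) : Int) = 0 := rfl
    rw [← h0]
    exact loopA_eq candies kn hkn 0 0 (Nat.zero_le _)
      (by simp; omega)
      (PySem.Dict.counter candies)
      (by intro c; simp [PySem.Dict.getD_counter])
      (PySem.Dict.nodup_keys_counter candies)
      (by intro c; simp [PySem.Dict.keys_counter, PySem.Set.mem_ofList])
      0 (by simp)
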